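-- pv_equiv track=rewrite | github.com/xhzeem/Bugcrowd-Templates-CSV-Generator | generate_csv.py | clean_recommendation_content
-- ===== SOURCE A (Python) =====
-- def clean_recommendation_content(content):
--     # Remove the first line if it's the title
--     lines = content.split('\n')
--     if lines and '# Recommendation(s)' in lines[0]:
--         lines = lines[1:]
--
--     # Find where references start
--     references = []
--     ref_start_idx = -1
--
--     for i, line in enumerate(lines):
--         if line.strip().lower().startswith('for more information') or \
--            line.strip().lower().startswith('reference'):
--             ref_start_idx = i
--             # Collect references
--             for j in range(i+1, len(lines)):
--                 ref_line = lines[j].strip()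
--                 if ref_line.startswith('- <') and ref_line.endswith('>'):
--                     references.append(ref_line[3:-1])  # Remove '- <' and '>'
--             break
--
--     # Get recommendation content without references section
--     if ref_start_idx != -1:
--         content = '\n'.join(lines[:ref_start_idx]).strip()
--     else:
--         content = '\n'.join(lines).strip()
--
--     return content, references
-- ===== SOURCE B (Python) =====
-- def clean_recommendation_content(content):
--     # Single linear pass over the lines with an in_refs flag
--     lines = content.split('\n')
--     if lines and '# Recommendation(s)' in lines[0]:
--         lines = lines[1:]
--
--     before = []
--     references = []
--     in_refs = False
--     for line in lines:
--         s = line.strip()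
--         low = s.lower()
--         if not in_refs and (low.startswith('for more information') or low.startswith('reference')):
--             in_refs = True
--         elif in_refs:
--             if s.startswith('- <') and s.endswith('>'):
--                 references.append(s[3:-1])
--         else:
--             before.append(line)
--
--     return '\n'.join(before).strip(), references
-- ===== Notes on version B (the rewrite author's own statement) =====
-- stated objective: simpler
-- what changed: Replaces A's enumerate-to-find-the-marker-index plus a second inner range loop over the tail and a final slice/join by one linear pass over the lines that maintains (before, in_refs, references) and never revisits a line.
import Mathlib
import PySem

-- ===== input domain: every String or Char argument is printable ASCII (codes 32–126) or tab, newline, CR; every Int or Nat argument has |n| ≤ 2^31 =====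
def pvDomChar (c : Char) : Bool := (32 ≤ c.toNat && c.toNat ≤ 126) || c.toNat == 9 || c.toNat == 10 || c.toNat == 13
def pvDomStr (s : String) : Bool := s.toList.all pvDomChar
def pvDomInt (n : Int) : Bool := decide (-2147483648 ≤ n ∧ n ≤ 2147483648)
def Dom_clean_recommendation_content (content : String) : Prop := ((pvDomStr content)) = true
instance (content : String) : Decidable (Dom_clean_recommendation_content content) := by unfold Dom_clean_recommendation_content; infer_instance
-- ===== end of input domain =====

-- B replaces A's find-marker-then-rescan (enumerate + inner range loop + slicing) by one
-- linear pass with an in_refs flag; objective: simpler, same asymptotic cost.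

-- content.split('\n') (both Pythons begin with this call)
def pvSplitNL (content : String) : List String :=
  (PySem.Chars.splitOn content.toList ['\n']).map (fun cs => String.ofList cs)

-- ===== PORT A =====
-- line.strip().lower().startswith('for more information') or line.strip().lower().startswith('reference')
def pvIsMarker (line : String) : Bool :=
  PySem.Str.startswith (PySem.Str.lower (PySem.Str.strip line)) "for more information" ||
  PySem.Str.startswith (PySem.Str.lower (PySem.Str.strip line)) "reference"

-- A's inner loop: for j in range(i+1, len(lines)), collect '- <…>' lines
def pvACollect : List String → List String
  | [] => []
  | l :: rest =>
    let s := PySem.Str.strip l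
    if PySem.Str.startswith s "- <" && PySem.Str.endswith s ">" then
      PySem.Str.slice s (some 3) (some (-1)) :: pvACollect rest
    else pvACollect rest

-- A's outer loop with break: returns (lines[:ref_start_idx], references) at the first
-- marker line, none when ref_start_idx stays -1
def pvAFind : List String → Option (List String × List String)
  | [] => none
  | l :: rest =>
    if pvIsMarker l then some ([], pvACollect rest)
    else
      match pvAFind rest with
      | none => none
      | some (b, r) => some (l :: b, r)

def clean_recommendation_content (content : String) : String × List String :=
  let lines := pvSplitNL content
  let lines :=
    match lines with
    | l0 :: rest => if PySem.Str.isIn "# Recommendation(s)" l0 then rest else lines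
    | [] => lines
  match pvAFind lines with
  | some (before, refs) => (PySem.Str.strip (PySem.Str.join "\n" before), refs)
  | none => (PySem.Str.strip (PySem.Str.join "\n" lines), [])

-- ===== PORT B =====
-- one iteration of B's single pass: state (before, in_refs, references)
def pvBStep (st : List String × Bool × List String) (line : String) :
    List String × Bool × List String :=
  match st with
  | (before, inRefs, refs) =>
    let s := PySem.Str.strip line
    let low := PySem.Str.lower s
    if !inRefs && (PySem.Str.startswith low "for more information" ||
                   PySem.Str.startswith low "reference") then
      (before, true, refs)
    else if inRefs then
      if PySem.Str.startswith s "- <" && PySem.Str.endswith s ">" then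
        (before, inRefs, refs ++ [PySem.Str.slice s (some 3) (some (-1))])
      else (before, inRefs, refs)
    else (before ++ [line], inRefs, refs)

def clean_recommendation_content_alt (content : String) : String × List String :=
  let lines := pvSplitNL content
  let lines :=
    match lines with
    | l0 :: rest => if PySem.Str.isIn "# Recommendation(s)" l0 then rest else lines
    | [] => lines
  match lines.foldl pvBStep ([], false, []) with
  | (before, _, refs) => (PySem.Str.strip (PySem.Str.join "\n" before), refs)

-- ===== PRECONDITION & SPEC =====
def Spec_clean_recommendation_content (content : String) (out : String × List String) : Prop := out = clean_recommendation_content_alt content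
instance (content : String) (out : String × List String) : Decidable (Spec_clean_recommendation_content content out) := by unfold Spec_clean_recommendation_content; infer_instance

-- ===== CLAIM (what is proved, stated in full; the proofs are below) =====
def Claim_equal_clean_recommendation_content : Prop := ∀ (content : String), Dom_clean_recommendation_content content → Spec_clean_recommendation_content content (clean_recommendation_content content)

-- ===== LEMMAS AND PROOFS =====

-- once in_refs is true, B's pass appends exactly A's collected references
theorem pvB_true (lines : List String) (before : List String) (refs : List String) :
    lines.foldl pvBStep (before, true, refs) = (before, true, refs ++ pvACollect lines) := by
  induction lines generalizing refs with
  | nil => simp [pvACollect]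
  | cons l rest ih =>
    simp only [List.foldl]
    have hstep : pvBStep (before, true, refs) l =
        (if PySem.Str.startswith (PySem.Str.strip l) "- <" &&
            PySem.Str.endswith (PySem.Str.strip l) ">" then
          (before, true, refs ++ [PySem.Str.slice (PySem.Str.strip l) (some 3) (some (-1))])
        else (before, true, refs)) := by
      simp [pvBStep]
    rw [hstep]
    simp only [pvACollect]
    split_ifs with h
    · rw [ih]; simp
    · rw [ih]

-- B's step with in_refs still false is exactly A's marker test
theorem pvBStep_false (l : String) (before : List String) (refs : List String) :
    pvBStep (before, false, refs) l =
      (if pvIsMarker l then (before, true, refs) else (before ++ [l], false, refs)) := by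
  simp only [pvBStep, pvIsMarker, Bool.not_false, Bool.true_and]
  split_ifs <;> simp_all

-- before the marker, B's pass follows A's search for the first marker line
theorem pvB_false (lines : List String) (before : List String) :
    lines.foldl pvBStep (before, false, []) =
      (match pvAFind lines with
       | none => (before ++ lines, false, [])
       | some (b, r) => (before ++ b, true, r)) := by
  induction lines generalizing before with
  | nil => simp [pvAFind]
  | cons l rest ih =>
    simp only [List.foldl, pvAFind, pvBStep_false]
    by_cases h : pvIsMarker l
    · rw [if_pos h, if_pos h, pvB_true]
      simp
    · rw [if_neg h, if_neg h, ih]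
      cases hf : pvAFind rest with
      | none => simp
      | some p => cases p with
        | mk b r => simp

-- the whole pipeline, stated over an arbitrary line list
theorem pvMain (L : List String) :
    (match pvAFind L with
     | some (b, r) => (PySem.Str.strip (PySem.Str.join "\n" b), r)
     | none => (PySem.Str.strip (PySem.Str.join "\n" L), [])) =
    (match L.foldl pvBStep ([], false, []) with
     | (b, _, r) => (PySem.Str.strip (PySem.Str.join "\n" b), r)) := by
  rw [pvB_false]
  cases h : pvAFind L with
  | none => simp
  | some p => cases p with
    | mk b r => simp

-- ===== VERDICT (by name: the statement is the Claim_ definition above) =====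
theorem clean_recommendation_content_spec : Claim_equal_clean_recommendation_content := by
  intro content _
  unfold Spec_clean_recommendation_content
  simp only [clean_recommendation_content, clean_recommendation_content_alt]
  exact pvMain _
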